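-- pv_equiv track=rewrite | github.com/haceneourlis/tr_tool | step4.supp.py | delete_char
-- ===== SOURCE A (Python) =====
-- def delete_char(line , right_arg):
--
--     def ccdel(function):
--         return ''.join(
--             '' if getattr(letter, function)() else letter
--             for letter in line
--         )
--
--     match right_arg:
--         case "A-Z"|"[:upper:]":
--             return ccdel("isupper")
--         case "a-z"|"[:lower:]":
--             return ccdel("islower")
--         case "[:alnum:]":
--             return ccdel("isalphanum")
--
--         case "[:alpha:]":
--             return ccdel("isalpha")
--
--         case "[:digit:]":
--             return ccdel("isdigit")
--         case _:
--             constructed_line =""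
--             chars_to_delete = list(right_arg)
--             for letter in line:
--                 if not(letter in chars_to_delete):
--                     constructed_line += letter
--             return constructed_line
-- ===== SOURCE B (Python) =====
-- _CLASS = {
--     'A-Z': str.isupper, '[:upper:]': str.isupper,
--     'a-z': str.islower, '[:lower:]': str.islower,
--     '[:alpha:]': str.isalpha,
--     '[:digit:]': str.isdigit,
-- }
--
-- def delete_char(line, right_arg):
--     pred = _CLASS.get(right_arg)
--     doomed = right_arg if pred is None else ''.join(filter(pred, line))
--     return line.translate(str.maketrans('', '', doomed))
-- ===== Notes on version B (the rewrite author's own statement) =====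
-- stated objective: faster
-- what changed: Instead of A's five per-branch keep-the-non-matching filter loops plus an accumulator membership loop, B first materializes the string of characters to delete (collecting line's chars matching the class predicate, or right_arg itself) and then performs the deletion in one str.translate pass over a maketrans deletion table.
-- outside the precondition, e.g. on delete_char('x', '[:alnum:]'): A raises AttributeError, B returns 'x'
import Mathlib
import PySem

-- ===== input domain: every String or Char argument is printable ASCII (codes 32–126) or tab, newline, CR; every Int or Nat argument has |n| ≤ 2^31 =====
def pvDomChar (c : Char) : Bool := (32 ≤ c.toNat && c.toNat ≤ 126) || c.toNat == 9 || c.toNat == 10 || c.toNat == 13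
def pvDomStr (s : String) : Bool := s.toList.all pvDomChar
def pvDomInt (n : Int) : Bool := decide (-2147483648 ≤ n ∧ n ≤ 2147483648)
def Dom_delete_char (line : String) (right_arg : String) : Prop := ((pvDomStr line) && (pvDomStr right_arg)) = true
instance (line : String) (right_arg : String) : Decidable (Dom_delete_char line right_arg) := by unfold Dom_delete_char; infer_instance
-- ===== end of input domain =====

-- B first materializes the string of characters to delete and then removes them in one
-- str.translate pass over a maketrans deletion table, instead of A's per-branch filter loops
-- (objective: alternative).

-- ===== PORT A =====
-- ccdel: ''.join('' if getattr(letter, function)() else letter for letter in line)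
def pvCcdel (line : String) (pred : Char → Bool) : String :=
  String.ofList (PySem.Chars.join []
    (line.toList.map (fun c => if pred c then [] else [c])))

def delete_char (line : String) (right_arg : String) : String :=
  if right_arg = "A-Z" ∨ right_arg = "[:upper:]" then pvCcdel line PySem.Chars.isupper
  else if right_arg = "a-z" ∨ right_arg = "[:lower:]" then pvCcdel line PySem.Chars.islower
  else if right_arg = "[:alnum:]" then
    -- Python calls the nonexistent str method 'isalphanum': AttributeError unless line is
    -- empty (then ''.join over an empty generator returns "" without calling it).
    -- Pre_ excludes the raising inputs; "" is the only value A ever returns on this branch.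
    ""
  else if right_arg = "[:alpha:]" then pvCcdel line PySem.Chars.isalpha
  else if right_arg = "[:digit:]" then pvCcdel line PySem.Chars.isdigit
  else
    -- constructed_line accumulator loop, chars_to_delete = list(right_arg)
    String.ofList (line.toList.foldl
      (fun acc c => if right_arg.toList.contains c then acc else acc ++ [c]) [])

-- ===== PORT B =====
-- _CLASS: token -> str predicate method (stored here as the method NAME; pvMethodPred applies it)
def pvMethods : PySem.Dict String String :=
  PySem.Dict.ofList
    [("A-Z", "isupper"), ("[:upper:]", "isupper"),
     ("a-z", "islower"), ("[:lower:]", "islower"),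
     ("[:alpha:]", "isalpha"),
     ("[:digit:]", "isdigit")]

-- the bound str methods stored in _CLASS (the final branch is unreachable: pvMethods only
-- holds the four names above)
def pvMethodPred (name : String) : Char → Bool :=
  if name = "isupper" then PySem.Chars.isupper
  else if name = "islower" then PySem.Chars.islower
  else if name = "isalpha" then PySem.Chars.isalpha
  else if name = "isdigit" then PySem.Chars.isdigit
  else fun _ => false

def delete_char_alt (line : String) (right_arg : String) : String :=
  let doomed : List Char :=
    match PySem.Dict.get? pvMethods right_arg with
    | none => right_arg.toList
    | some name => line.toList.filter (pvMethodPred name)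
  -- line.translate(str.maketrans('', '', doomed)): the table maps each char of doomed to
  -- None and translate drops exactly those chars — i.e. keep c iff c ∉ doomed (exact).
  String.ofList (line.toList.filter (fun c => !doomed.contains c))

-- ===== PRECONDITION & SPEC =====
-- Pre_ excludes exactly the inputs on which A raises AttributeError: right_arg = "[:alnum:]" with a nonempty line.
def Pre_delete_char (line : String) (right_arg : String) : Prop :=
  ¬ (right_arg = "[:alnum:]" ∧ line ≠ "")
instance (line : String) (right_arg : String) : Decidable (Pre_delete_char line right_arg) := by
  unfold Pre_delete_char; infer_instance

def pvWitness_delete_char : String × String := ("Hello World", "A-Z")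

def Spec_delete_char (line : String) (right_arg : String) (out : String) : Prop := out = delete_char_alt line right_arg
instance (line : String) (right_arg : String) (out : String) : Decidable (Spec_delete_char line right_arg out) := by unfold Spec_delete_char; infer_instance

-- ===== CLAIM (what is proved, stated in full; the proofs are below) =====
def Claim_equal_delete_char : Prop := ∀ (line : String) (right_arg : String), Dom_delete_char line right_arg → Pre_delete_char line right_arg → Spec_delete_char line right_arg (delete_char line right_arg)

-- ===== LEMMAS AND PROOFS =====

-- flattening with an empty separator ignores the interspersing
theorem pvFlatten_intersperse_nil (l : List (List Char)) :
    (List.intersperse ([] : List Char) l).flatten = l.flatten := by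
  induction l with
  | nil => rfl
  | cons x xs ih =>
    cases xs with
    | nil => simp
    | cons y ys =>
      simp_all [show List.intersperse ([] : List Char) (x :: y :: ys)
        = x :: [] :: List.intersperse [] (y :: ys) from rfl]

-- A's join-of-empty-or-singleton body computes a filter.
theorem pvCcdel_eq_filter (line : String) (pred : Char → Bool) :
    pvCcdel line pred = String.ofList (line.toList.filter (fun c => !pred c)) := by
  unfold pvCcdel
  congr 1
  simp only [PySem.Chars.join, List.intercalate, pvFlatten_intersperse_nil]
  induction line.toList with
  | nil => rfl
  | cons c cs ih =>
    by_cases h : pred c = true <;> simp [h, ih]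

-- A's default-branch accumulator loop computes a filter.
theorem pvDefault_eq_filter (l : List Char) (dels : List Char) (acc : List Char) :
    l.foldl (fun acc c => if dels.contains c then acc else acc ++ [c]) acc
      = acc ++ l.filter (fun c => !dels.contains c) := by
  induction l generalizing acc with
  | nil => simp
  | cons c cs ih =>
    rw [List.foldl_cons]
    by_cases h : dels.contains c = true
    · rw [if_pos h, ih]
      simp only [List.filter_cons, h, Bool.not_true, Bool.false_eq_true, if_false]
    · rw [if_neg h, ih, List.filter_cons]
      simp only [Bool.not_eq_true] at h
      rw [if_pos (by simp_all)]
      simp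

-- Every char the filter visits is a member of l, so the membership conjunct is vacuous:
-- filtering l by "not in l's p-chars" is filtering l by "not p".
theorem pvFilter_mem_self (l : List Char) (p : Char → Bool) :
    l.filter (fun c => !decide (c ∈ l) || !p c) = l.filter (fun c => !p c) :=
  List.filter_congr (fun c hc => by simp [hc])

-- ===== VERDICT (by name: the statement is the Claim_ definition above) =====
theorem delete_char_spec : Claim_equal_delete_char := by
  intro line right_arg _ hpre
  unfold Spec_delete_char delete_char delete_char_alt
  by_cases h1 : right_arg = "A-Z" ∨ right_arg = "[:upper:]"
  · rcases h1 with h | h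
    · subst h
      have hg : PySem.Dict.get? pvMethods "A-Z" = some "isupper" := by decide
      simp [hg, pvCcdel_eq_filter, pvMethodPred, pvFilter_mem_self]
    · subst h
      have hg : PySem.Dict.get? pvMethods "[:upper:]" = some "isupper" := by decide
      simp [hg, pvCcdel_eq_filter, pvMethodPred, pvFilter_mem_self]
  · by_cases h2 : right_arg = "a-z" ∨ right_arg = "[:lower:]"
    · rcases h2 with h | h
      · subst h
        have hg : PySem.Dict.get? pvMethods "a-z" = some "islower" := by decide
        simp [h1, hg, pvCcdel_eq_filter, pvMethodPred, pvFilter_mem_self]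
      · subst h
        have hg : PySem.Dict.get? pvMethods "[:lower:]" = some "islower" := by decide
        simp [h1, hg, pvCcdel_eq_filter, pvMethodPred, pvFilter_mem_self]
    · by_cases h3 : right_arg = "[:alnum:]"
      · subst h3
        have hl : line = "" := by
          by_contra hne
          exact hpre ⟨rfl, hne⟩
        subst hl
        have hg : PySem.Dict.get? pvMethods "[:alnum:]" = none := by decide
        simp [h1, h2, hg]
      · by_cases h4 : right_arg = "[:alpha:]"
        · subst h4
          have hg : PySem.Dict.get? pvMethods "[:alpha:]" = some "isalpha" := by decide
          simp [h1, h2, h3, hg, pvCcdel_eq_filter, pvMethodPred, pvFilter_mem_self]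
        · by_cases h5 : right_arg = "[:digit:]"
          · subst h5
            have hg : PySem.Dict.get? pvMethods "[:digit:]" = some "isdigit" := by decide
            simp [h1, h2, h3, h4, hg, pvCcdel_eq_filter, pvMethodPred, pvFilter_mem_self]
          · rw [not_or] at h1 h2
            have hb : ∀ k : String, right_arg ≠ k → (k == right_arg) = false := by
              intro k hk
              simp only [beq_eq_false_iff_ne, ne_eq]
              exact fun e => hk e.symm
            have hmiss : PySem.Dict.get? pvMethods right_arg = none := by
              rw [show pvMethods = PySem.Dict.mk
                  [("A-Z", "isupper"), ("[:upper:]", "isupper"),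
                   ("a-z", "islower"), ("[:lower:]", "islower"),
                   ("[:alpha:]", "isalpha"),
                   ("[:digit:]", "isdigit")] from rfl]
              simp only [PySem.Dict.get?_mk_cons, hb _ h1.1, hb _ h1.2, hb _ h2.1,
                hb _ h2.2, hb _ h4, hb _ h5, if_false, Bool.false_eq_true]
              simp [PySem.Dict.get?]
            simp only [h1.1, h1.2, h2.1, h2.2, h3, h4, h5, or_self, if_false, hmiss]
            rw [pvDefault_eq_filter]
            simp
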